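-- pv_equiv track=rewrite | github.com/wei134102/U-Wii-X-Fusion | Data/build_wiiu_titles_json.py | resolve_game_id
-- ===== SOURCE A (Python) =====
-- def resolve_game_id(product_code, gametitle_ids, wiiutdb_ids):
--     """根据 ProductCode（4 位）解析出 6 位 game_id，优先 6 位"""
--     pc = (product_code or "").strip().upper()
--     if len(pc) < 4:
--         return None
--     candidates = []
--     for gid in gametitle_ids:
--         if gid.upper().startswith(pc):
--             candidates.append(gid)
--     for gid in wiiutdb_ids:
--         if gid.upper().startswith(pc) and gid not in candidates:
--             candidates.append(gid)
--     if not candidates: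
--         return None
--     # 优先 6 位
--     six_char = [c for c in candidates if len(c) == 6]
--     if six_char:
--         return six_char[0]
--     four_char = [c for c in candidates if len(c) == 4]
--     if four_char:
--         return four_char[0]
--     return candidates[0]
-- ===== SOURCE B (Python) =====
-- def resolve_game_id(product_code, gametitle_ids, wiiutdb_ids):
--     """根据 ProductCode（4 位）解析出 6 位 game_id，优先 6 位"""
--     pc = (product_code or "").strip().upper()
--     if len(pc) < 4:
--         return None
--     first_six = first_four = first_any = None
--     for gid in list(gametitle_ids) + list(wiiutdb_ids):
--         if gid.upper().startswith(pc):
--             if first_six is None and len(gid) == 6: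
--                 first_six = gid
--             if first_four is None and len(gid) == 4:
--                 first_four = gid
--             if first_any is None:
--                 first_any = gid
--     if first_six is not None:
--         return first_six
--     if first_four is not None:
--         return first_four
--     return first_any
-- ===== Notes on version B (the rewrite author's own statement) =====
-- stated objective: simpler
-- what changed: Replaces the candidates list (two accumulating loops with a dedup membership scan, then three filter passes) by one single pass over both id lists that keeps only the first matching 6-char, 4-char and any-length id; dedup is dropped because only the first element of each category matters.
import Mathlib
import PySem

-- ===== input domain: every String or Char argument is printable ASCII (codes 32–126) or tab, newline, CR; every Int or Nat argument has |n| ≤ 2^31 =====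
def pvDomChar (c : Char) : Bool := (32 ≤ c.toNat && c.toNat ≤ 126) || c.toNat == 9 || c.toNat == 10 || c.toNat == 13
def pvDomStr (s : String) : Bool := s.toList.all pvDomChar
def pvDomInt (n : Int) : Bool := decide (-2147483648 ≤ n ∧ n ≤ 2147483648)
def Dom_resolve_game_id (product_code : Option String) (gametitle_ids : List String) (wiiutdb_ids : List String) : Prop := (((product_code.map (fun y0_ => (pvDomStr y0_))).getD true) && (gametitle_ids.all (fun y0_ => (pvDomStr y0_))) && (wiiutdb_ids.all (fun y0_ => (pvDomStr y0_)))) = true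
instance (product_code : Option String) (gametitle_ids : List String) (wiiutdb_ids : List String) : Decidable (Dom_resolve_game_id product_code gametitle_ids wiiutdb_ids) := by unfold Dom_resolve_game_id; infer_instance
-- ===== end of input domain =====

-- B replaces A's candidates list (two accumulating loops with dedup, then three filter passes)
-- by one single pass keeping the first matching 6-char, 4-char and any-length id; objective: simpler.

-- ===== PORT A =====
def resolve_game_id (product_code : Option String) (gametitle_ids : List String) (wiiutdb_ids : List String) : Option String :=
  let pc := PySem.Str.upper (PySem.Str.strip (product_code.getD ""))
  if PySem.Str.len pc < 4 then none
  else
    let c1 := gametitle_ids.foldl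
      (fun c gid => if PySem.Str.startswith (PySem.Str.upper gid) pc then c ++ [gid] else c) []
    let candidates := wiiutdb_ids.foldl
      (fun c gid => if PySem.Str.startswith (PySem.Str.upper gid) pc && !(c.contains gid) then c ++ [gid] else c) c1
    if candidates = [] then none
    else
      let six_char := candidates.filter (fun c => PySem.Str.len c == 6)
      if six_char ≠ [] then six_char.head?
      else
        let four_char := candidates.filter (fun c => PySem.Str.len c == 4)
        if four_char ≠ [] then four_char.head?
        else candidates.head?

-- ===== PORT B =====
def resolve_game_id_alt (product_code : Option String) (gametitle_ids : List String) (wiiutdb_ids : List String) : Option String :=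
  let pc := PySem.Str.upper (PySem.Str.strip (product_code.getD ""))
  if PySem.Str.len pc < 4 then none
  else
    let r := (gametitle_ids ++ wiiutdb_ids).foldl
      (fun (s : Option String × Option String × Option String) gid =>
        if PySem.Str.startswith (PySem.Str.upper gid) pc then
          ((if s.1.isNone && PySem.Str.len gid == 6 then some gid else s.1),
           (if s.2.1.isNone && PySem.Str.len gid == 4 then some gid else s.2.1),
           (if s.2.2.isNone then some gid else s.2.2))
        else s)
      (none, none, none)
    match r with
    | (some x, _, _) => some x
    | (none, some x, _) => some x
    | (none, none, sa) => sa

-- ===== PRECONDITION & SPEC =====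
def Spec_resolve_game_id (product_code : Option String) (gametitle_ids : List String) (wiiutdb_ids : List String) (out : Option String) : Prop := out = resolve_game_id_alt product_code gametitle_ids wiiutdb_ids
instance (product_code : Option String) (gametitle_ids : List String) (wiiutdb_ids : List String) (out : Option String) : Decidable (Spec_resolve_game_id product_code gametitle_ids wiiutdb_ids out) := by unfold Spec_resolve_game_id; infer_instance

-- ===== CLAIM (what is proved, stated in full; the proofs are below) =====
def Claim_equal_resolve_game_id : Prop := ∀ (product_code : Option String) (gametitle_ids : List String) (wiiutdb_ids : List String), Dom_resolve_game_id product_code gametitle_ids wiiutdb_ids → Spec_resolve_game_id product_code gametitle_ids wiiutdb_ids (resolve_game_id product_code gametitle_ids wiiutdb_ids)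

-- ===== LEMMAS AND PROOFS =====

-- head? of a list equals find? with the always-true predicate
theorem pv_head?_eq_find? (l : List String) : l.head? = l.find? (fun _ => true) := by
  cases l <;> simp [List.find?]

-- find? over a filtered list
theorem pv_find?_filter (l : List String) (p q : String → Bool) :
    (l.filter p).find? q = l.find? (fun x => p x && q x) := by
  induction l with
  | nil => rfl
  | cons a t ih =>
    by_cases hp : p a <;> by_cases hq : q a <;>
      simp [List.filter_cons, List.find?_cons, hp, hq, ih]

-- find? over A's dedup-appending wiiutdb loop: the membership check never changes the first match
theorem pv_find?_dedup_fold (p q : String → Bool) (l acc : List String) :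
    (l.foldl (fun c g => if p g && !(c.contains g) then c ++ [g] else c) acc).find? q
      = ((acc.find? q).or (l.find? (fun g => p g && q g))) := by
  induction l generalizing acc with
  | nil => simp [List.foldl]
  | cons a t ih =>
    simp only [List.foldl_cons]
    by_cases hp : p a
    · by_cases hm : acc.contains a
      · rw [if_neg (by simp [hp]; exact List.mem_of_elem_eq_true hm)]
        rw [ih]
        by_cases hq : q a
        · have hsome : (acc.find? q).isSome := by
            rw [List.find?_isSome]
            exact ⟨a, List.mem_of_elem_eq_true hm, hq⟩
          obtain ⟨y, hy⟩ := Option.isSome_iff_exists.mp hsome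
          simp [List.find?_cons, hp, hq, hy]
        · simp [List.find?_cons, hp, hq]
      · rw [if_pos (by simp [hp]; exact fun h => hm (List.elem_eq_true_of_mem h))]
        rw [ih, List.find?_append]
        by_cases hq : q a <;>
          simp [List.find?_cons, hp, hq, Option.or_assoc]
    · rw [if_neg (by simp [hp])]
      rw [ih]
      simp [List.find?_cons, hp]

-- B's single pass computes, in each component, the first match of the corresponding predicate
theorem pv_alt_fold (p : String → Bool) (l : List String)
    (s : Option String × Option String × Option String) :
    l.foldl
      (fun (s : Option String × Option String × Option String) gid =>
        if p gid then
          ((if s.1.isNone && PySem.Str.len gid == 6 then some gid else s.1),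
           (if s.2.1.isNone && PySem.Str.len gid == 4 then some gid else s.2.1),
           (if s.2.2.isNone then some gid else s.2.2))
        else s) s
      = (s.1.or (l.find? (fun g => p g && PySem.Str.len g == 6)),
         s.2.1.or (l.find? (fun g => p g && PySem.Str.len g == 4)),
         s.2.2.or (l.find? p)) := by
  induction l generalizing s with
  | nil => simp
  | cons a t ih =>
    simp only [List.foldl_cons]
    by_cases hp : p a
    · rw [ih]
      obtain ⟨s6, s4, sa⟩ := s
      by_cases h6 : ((a.length : Int) = 6) <;> by_cases h4 : ((a.length : Int) = 4) <;>
        cases s6 <;> cases s4 <;> cases sa <;>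
          simp [List.find?_cons, hp, h6, h4, PySem.Str.len]
    · rw [ih]
      simp [List.find?_cons, hp]

-- ===== VERDICT (by name: the statement is the Claim_ definition above) =====

-- A's pick chain as an Option.or chain
theorem pv_chain (cand : List String) (q6 q4 : String → Bool) :
    (if cand = [] then none else
      if cand.filter q6 ≠ [] then (cand.filter q6).head?
      else if cand.filter q4 ≠ [] then (cand.filter q4).head?
      else cand.head?)
    = ((cand.filter q6).head?).or (((cand.filter q4).head?).or cand.head?) := by
  by_cases h : cand = []
  · simp [h]
  · simp only [h, if_neg (by simp [h] : ¬ cand = [])]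
    cases h6 : cand.filter q6 with
    | cons a t => simp
    | nil =>
      cases h4 : cand.filter q4 with
      | cons a t => simp
      | nil => simp

-- B's final match as an Option.or chain
theorem pv_match_or (o6 o4 oa : Option String) :
    (match (o6, o4, oa) with
      | (some x, _, _) => some x
      | (none, some x, _) => some x
      | (none, none, sa) => sa)
    = o6.or (o4.or oa) := by
  cases o6 <;> cases o4 <;> simp

-- ===== VERDICT (by name: the statement is the Claim_ definition above) =====
theorem resolve_game_id_spec : Claim_equal_resolve_game_id := by
  intro product_code gametitle_ids wiiutdb_ids _
  unfold Spec_resolve_game_id resolve_game_id resolve_game_id_alt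
  set pc := PySem.Str.upper (PySem.Str.strip (product_code.getD "")) with hpc
  by_cases hlen : PySem.Str.len pc < 4
  · rw [if_pos hlen, if_pos hlen]
  · rw [if_neg hlen, if_neg hlen]
    rw [pv_alt_fold, List.find?_append, List.find?_append, List.find?_append, pv_match_or]
    rw [PySem.List.foldl_append_if_eq_filter, List.nil_append]
    rw [pv_chain]
    rw [pv_head?_eq_find?, pv_head?_eq_find?, pv_head?_eq_find?]
    rw [pv_find?_filter, pv_find?_filter]
    rw [pv_find?_dedup_fold, pv_find?_dedup_fold, pv_find?_dedup_fold]
    rw [pv_find?_filter, pv_find?_filter, pv_find?_filter]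
    simp only [Bool.and_true, Option.none_or]
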